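-- pv_equiv track=rewrite | github.com/jhkoo0314/sfe_master_ops | adapters/crm/company_master_adapter.py | _resolve_column_name
-- ===== SOURCE A (Python) =====
-- def _normalize_column_name(name: str) -> str:
--     return "".join(ch for ch in str(name).strip().lower() if ch.isalnum())
--
-- def _resolve_column_name(columns: list[str], preferred: str | None, aliases: tuple[str, ...]) -> str | None:
--     if not preferred and not aliases:
--         return preferred
--     normalized_map = {
--         _normalize_column_name(column): str(column)
--         for column in columns
--     }
--     candidates = ((preferred,) if preferred else tuple()) + aliases
--     for candidate in candidates:
--         matched = normalized_map.get(_normalize_column_name(candidate))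
--         if matched:
--             return matched
--     return preferred
-- ===== SOURCE B (Python) =====
-- def _normalize_column_name(name: str) -> str:
--     return "".join(ch for ch in str(name).strip().lower() if ch.isalnum())
--
-- def _resolve_column_name(columns: list[str], preferred: str | None, aliases: tuple[str, ...]) -> str | None:
--     # Loop inversion with a slot table: candidate keys are deduped into slots
--     # (first occurrence wins), one pass over columns fills each slot with the
--     # last matching column, then the slots are scanned in candidate order.
--     if not preferred and not aliases:
--         return preferred
--     candidates = ((preferred,) if preferred else tuple()) + tuple(aliases)
--     slot = {}
--     for candidate in candidates:
--         slot.setdefault(_normalize_column_name(candidate), len(slot))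
--     best = [None] * len(slot)
--     for column in columns:
--         i = slot.get(_normalize_column_name(column))
--         if i is not None:
--             best[i] = str(column)
--     for b in best:
--         if b:
--             return b
--     return preferred
-- ===== Notes on version B (the rewrite author's own statement) =====
-- stated objective: alternative
-- what changed: Inverts the loops and replaces the normalized-columns dict with a slot table: candidate keys are deduped into slot indices (first occurrence wins), a single forward pass over columns fills each slot with the last matching column (reproducing dict last-wins), and the slots are then scanned once in candidate order for the first truthy entry.
import Mathlib
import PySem

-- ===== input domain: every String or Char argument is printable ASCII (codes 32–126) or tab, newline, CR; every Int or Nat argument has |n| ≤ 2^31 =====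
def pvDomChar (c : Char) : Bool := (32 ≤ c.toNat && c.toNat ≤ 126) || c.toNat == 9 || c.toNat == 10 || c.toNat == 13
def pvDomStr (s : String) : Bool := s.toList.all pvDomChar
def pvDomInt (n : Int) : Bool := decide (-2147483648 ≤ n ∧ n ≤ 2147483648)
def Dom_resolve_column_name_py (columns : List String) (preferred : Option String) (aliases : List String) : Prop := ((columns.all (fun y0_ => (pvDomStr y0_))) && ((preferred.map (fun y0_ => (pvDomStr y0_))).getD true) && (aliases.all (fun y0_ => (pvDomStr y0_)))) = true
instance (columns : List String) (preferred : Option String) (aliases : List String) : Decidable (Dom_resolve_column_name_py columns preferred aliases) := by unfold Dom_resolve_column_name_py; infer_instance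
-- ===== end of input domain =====

-- B inverts the loops: candidate keys are deduped into dict slots, a single pass over columns fills the slots, then the slots are scanned (objective: alternative decomposition).

-- ===== PORT A =====
-- normalize: "".join(ch for ch in str(name).strip().lower() if ch.isalnum())
def pvNorm (name : String) : String :=
  String.mk ((PySem.Chars.lower (PySem.Chars.strip name.toList)).filter PySem.Chars.isalnum)

-- the 'for candidate in candidates' loop of A
def pvLoopA (m : PySem.Dict String String) (preferred : Option String) : List String → Option String
  | [] => preferred
  | c :: rest =>
    match m.get? (pvNorm c) with
    | some v => if v = "" then pvLoopA m preferred rest else some v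
    | none => pvLoopA m preferred rest

def resolve_column_name_py (columns : List String) (preferred : Option String) (aliases : List String) : Option String :=
  if (preferred.getD "" = "") ∧ aliases = [] then preferred
  else
    let normalized_map := columns.foldl (fun d column => d.insert (pvNorm column) column) (PySem.Dict.empty)
    let candidates := (match preferred with
      | some p => if p = "" then [] else [p]
      | none => []) ++ aliases
    pvLoopA normalized_map preferred candidates

-- ===== PORT B =====
-- 'for candidate in candidates: slot.setdefault(_normalize_column_name(candidate), len(slot))'
def pvSlots (candidates : List String) : PySem.Dict String Nat :=
  candidates.foldl (fun d c => d.setdefault (pvNorm c) d.size) PySem.Dict.empty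

-- 'best = [None]*len(slot); for column in columns: i = slot.get(...); if i is not None: best[i] = str(column)'
def pvFillBest (slot : PySem.Dict String Nat) (columns : List String) : List (Option String) :=
  columns.foldl
    (fun best column =>
      match slot.get? (pvNorm column) with
      | some i => best.set i column
      | none => best)
    (List.replicate slot.size (none : Option String))

-- 'for b in best: if b: return b' / 'return preferred'
def pvFirstTruthy (preferred : Option String) : List (Option String) → Option String
  | [] => preferred
  | b :: rest =>
    match b with
    | some v => if v = "" then pvFirstTruthy preferred rest else some v
    | none => pvFirstTruthy preferred rest

def resolve_column_name_py_alt (columns : List String) (preferred : Option String) (aliases : List String) : Option String :=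
  if (preferred.getD "" = "") ∧ aliases = [] then preferred
  else
    let candidates := (match preferred with
      | some p => if p = "" then [] else [p]
      | none => []) ++ aliases
    let slot := pvSlots candidates
    pvFirstTruthy preferred (pvFillBest slot columns)

-- ===== PRECONDITION & SPEC =====
def Spec_resolve_column_name_py (columns : List String) (preferred : Option String) (aliases : List String) (out : Option String) : Prop := out = resolve_column_name_py_alt columns preferred aliases
instance (columns : List String) (preferred : Option String) (aliases : List String) (out : Option String) : Decidable (Spec_resolve_column_name_py columns preferred aliases out) := by unfold Spec_resolve_column_name_py; infer_instance

-- ===== CLAIM (what is proved, stated in full; the proofs are below) =====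
def Claim_equal_resolve_column_name_py : Prop := ∀ (columns : List String) (preferred : Option String) (aliases : List String), Dom_resolve_column_name_py columns preferred aliases → Spec_resolve_column_name_py columns preferred aliases (resolve_column_name_py columns preferred aliases)

-- ===== LEMMAS AND PROOFS =====
-- index of the first occurrence of k (proof-side description of the slot dict)
def pvIdx (k : String) : List String → Option Nat
  | [] => none
  | x :: xs => if x = k then some 0 else (pvIdx k xs).map (· + 1)

-- the truthiness filter of the final scans
def pvTruthy (b : Option String) : Option String :=
  match b with
  | some v => if v = "" then none else some v
  | none => none

theorem pv_firstTruthy_eq (preferred : Option String) (xs : List (Option String)) :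
    pvFirstTruthy preferred xs
      = match xs.findSome? pvTruthy with
        | some v => some v
        | none => preferred := by
  induction xs with
  | nil => rfl
  | cons b rest ih =>
    cases b with
    | none => simpa [pvFirstTruthy, pvTruthy] using ih
    | some v =>
      by_cases hv : v = "" <;> simp [pvFirstTruthy, pvTruthy, hv, ih]

-- A's candidate loop = a final scan of the mapped lookups
theorem pv_loopA_firstTruthy (m : PySem.Dict String String) (preferred : Option String) :
    ∀ (cands : List String),
      pvLoopA m preferred cands
        = pvFirstTruthy preferred (cands.map (fun c => m.get? (pvNorm c))) := by
  intro cands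
  induction cands with
  | nil => rfl
  | cons c rest ih => simp only [pvLoopA, List.map_cons, pvFirstTruthy, ih]

-- dict lookup after A's build fold = last matching column, generalized over the accumulator
theorem pv_get_fold (columns : List String) (d : PySem.Dict String String) (key : String) :
    (columns.foldl (fun d column => d.insert (pvNorm column) column) d).get? key
      = columns.foldl (fun b column => if key = pvNorm column then some column else b) (d.get? key) := by
  induction columns generalizing d with
  | nil => rfl
  | cons c rest ih =>
    simp only [List.foldl_cons, ih]
    by_cases h : key = pvNorm c
    · subst h; rw [PySem.Dict.get?_insert_self]; simp
    · rw [PySem.Dict.get?_insert_of_ne _ _ h]; simp [h]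

-- zipWith over the same key list composes pointwise
theorem pv_zipWith_zipWith (f g : String → Option String → Option String) :
    ∀ (keys : List String) (init : List (Option String)),
      List.zipWith f keys (List.zipWith g keys init)
        = List.zipWith (fun k b => f k (g k b)) keys init := by
  intro keys
  induction keys with
  | nil => intro init; rfl
  | cons k ks ih =>
    intro init
    cases init with
    | nil => rfl
    | cons b bs => simp [List.zipWith, ih]

-- zipWith projecting the second list is the identity when the lengths agree
theorem pv_zipWith_snd :
    ∀ (keys : List String) (init : List (Option String)), init.length = keys.length →
      List.zipWith (fun _ b => b) keys init = init := by
  intro keys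
  induction keys with
  | nil => intro init h; simp at h; simp [h]
  | cons k ks ih =>
    intro init h
    cases init with
    | nil => simp at h
    | cons b bs => simp at h; simp [List.zipWith, ih bs h]

-- zipWith against replicate none is a map
theorem pv_zipWith_replicate (f : String → Option String → Option String) :
    ∀ (keys : List String),
      List.zipWith f keys (List.replicate keys.length (none : Option String))
        = keys.map (fun k => f k none) := by
  intro keys
  induction keys with
  | nil => rfl
  | cons k ks ih => simp [List.replicate, ih]

-- the slot update leaves untouched every slot whose key differs
theorem pv_zipWith_notmem (norm col : String) :
    ∀ (xs : List String) (bs : List (Option String)), norm ∉ xs → bs.length = xs.length →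
      List.zipWith (fun k b => if k = norm then some col else b) xs bs = bs := by
  intro xs
  induction xs with
  | nil => intro bs _ h; simp at h; simp [h]
  | cons x t ih =>
    intro bs hmem h
    cases bs with
    | nil => simp at h
    | cons b bt =>
      simp at h hmem
      have hx : x ≠ norm := fun he => hmem.1 he.symm
      simp [List.zipWith, hx, ih bt hmem.2 h]

-- setting at the first-occurrence index = a pointwise zipWith update (Nodup keys)
theorem pv_set_idx (norm col : String) :
    ∀ (order : List String) (init : List (Option String)), order.Nodup → init.length = order.length →
      (match pvIdx norm order with
        | some i => init.set i col
        | none => init)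
      = List.zipWith (fun k b => if k = norm then some col else b) order init := by
  intro order
  induction order with
  | nil => intro init _ h; simp at h; simp [pvIdx, h]
  | cons x xs ih =>
    intro init hnd h
    cases init with
    | nil => simp at h
    | cons b bs =>
      simp at h
      rw [List.nodup_cons] at hnd
      by_cases hx : x = norm
      · subst hx
        have : x ∉ xs := hnd.1
        simp [pvIdx, List.zipWith, pv_zipWith_notmem x col xs bs this h]
      · simp only [pvIdx, List.zipWith, if_neg hx]
        cases hidx : pvIdx norm xs with
        | none => simp [← ih bs hnd.2 h, hidx]
        | some i => simp [List.set, ← ih bs hnd.2 h, hidx]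

-- the column pass acts independently on each slot
theorem pv_fold_set (d : PySem.Dict String Nat) (order : List String)
    (hnd : order.Nodup) (hget : ∀ k, d.get? k = pvIdx k order) :
    ∀ (columns : List String) (init : List (Option String)), init.length = order.length →
      columns.foldl
          (fun best column =>
            match d.get? (pvNorm column) with
            | some i => best.set i column
            | none => best)
          init
        = List.zipWith
            (fun k b0 => columns.foldl (fun b column => if k = pvNorm column then some column else b) b0)
            order init := by
  intro columns
  induction columns with
  | nil =>
    intro init h
    simp only [List.foldl_nil]
    exact (pv_zipWith_snd order init h).symm
  | cons c cs ih =>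
    intro init h
    have hstep : (match d.get? (pvNorm c) with
        | some i => init.set i c
        | none => init)
        = List.zipWith (fun k b => if k = pvNorm c then some c else b) order init := by
      rw [hget]
      exact pv_set_idx (pvNorm c) c order init hnd h
    have hlen : (List.zipWith (fun k b => if k = pvNorm c then some c else b) order init).length
        = order.length := by simp [List.length_zipWith, h]
    calc (c :: cs).foldl _ init
        = cs.foldl _ (List.zipWith (fun k b => if k = pvNorm c then some c else b) order init) := by
          simp only [List.foldl_cons, hstep]
      _ = List.zipWith
            (fun k b0 => cs.foldl (fun b column => if k = pvNorm column then some column else b) b0)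
            order (List.zipWith (fun k b => if k = pvNorm c then some c else b) order init) := ih _ hlen
      _ = _ := by rw [pv_zipWith_zipWith]; simp only [List.foldl_cons]

-- first-occurrence index appended with a fresh key
theorem pv_pvIdx_append (k key : String) :
    ∀ (keys : List String), key ∉ keys →
      pvIdx k (keys ++ [key]) = if k = key then some keys.length else pvIdx k keys := by
  intro keys
  induction keys with
  | nil =>
    intro _
    by_cases h : k = key
    · subst h; simp [pvIdx]
    · have : ¬ key = k := fun he => h he.symm
      simp [pvIdx, this, h]
  | cons x xs ih =>
    intro hmem
    simp at hmem
    by_cases hx : x = k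
    · have hk : ¬ k = key := fun he => hmem.1 ((hx.trans he).symm)
      simp [pvIdx, hx, hk]
    · simp only [List.cons_append, pvIdx, if_neg hx, ih hmem.2]
      by_cases hk : k = key
      · simp [hk]
      · simp [hk]

-- the setdefault loop builds the dict of first-occurrence slot indices
theorem pv_slot_inv :
    ∀ (cs : List String) (d : PySem.Dict String Nat),
      d.keys.Nodup → d.size = d.keys.length → (∀ k, d.get? k = pvIdx k d.keys) →
      (cs.foldl (fun d c => d.setdefault (pvNorm c) d.size) d).keys
          = PySem.Set.update d.keys (cs.map pvNorm)
        ∧ (cs.foldl (fun d c => d.setdefault (pvNorm c) d.size) d).keys.Nodup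
        ∧ (cs.foldl (fun d c => d.setdefault (pvNorm c) d.size) d).size
          = (cs.foldl (fun d c => d.setdefault (pvNorm c) d.size) d).keys.length
        ∧ ∀ k, (cs.foldl (fun d c => d.setdefault (pvNorm c) d.size) d).get? k
          = pvIdx k (cs.foldl (fun d c => d.setdefault (pvNorm c) d.size) d).keys := by
  intro cs
  induction cs with
  | nil =>
    intro d hnd hsize hget
    simp [PySem.Set.update_nil, hnd, hsize, hget]
  | cons c rest ih =>
    intro d hnd hsize hget
    by_cases hc : d.contains (pvNorm c) = true
    · have hd : d.setdefault (pvNorm c) d.size = d := PySem.Dict.setdefault_of_contains d _ hc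
      have hmemk : pvNorm c ∈ d.keys := (PySem.Dict.contains_iff_mem_keys d _).1 hc
      have hadd : PySem.Set.add d.keys (pvNorm c) = d.keys := by
        simp [PySem.Set.add, hmemk]
      simp only [List.foldl_cons, hd, List.map_cons, PySem.Set.update_cons, hadd]
      exact ih d hnd hsize hget
    · have hc' : d.contains (pvNorm c) = false := by simpa using hc
      have hd : d.setdefault (pvNorm c) d.size = d.insert (pvNorm c) d.size :=
        PySem.Dict.setdefault_of_not_contains d _ hc'
      have hmem : pvNorm c ∉ d.keys := fun hm =>
        by simp [(PySem.Dict.contains_iff_mem_keys d _).2 hm] at hc'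
      have hkeys : (d.insert (pvNorm c) d.size).keys = d.keys ++ [pvNorm c] :=
        PySem.Dict.keys_insert_of_not_contains d _ hc'
      have hnd' : (d.insert (pvNorm c) d.size).keys.Nodup := by
        rw [hkeys]
        exact hnd.append (List.nodup_singleton _) (List.disjoint_singleton.2 hmem)
      have hsize' : (d.insert (pvNorm c) d.size).size = (d.insert (pvNorm c) d.size).keys.length := by
        rw [hkeys, PySem.Dict.size_insert]
        simp [hc', hsize]
      have hget' : ∀ k, (d.insert (pvNorm c) d.size).get? k
          = pvIdx k (d.insert (pvNorm c) d.size).keys := by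
        intro k
        rw [hkeys, PySem.Dict.get?_insert, pv_pvIdx_append k (pvNorm c) d.keys hmem, hget, hsize]
      have hadd : PySem.Set.add d.keys (pvNorm c) = d.keys ++ [pvNorm c] := by
        simp [PySem.Set.add, hmem]
      simp only [List.foldl_cons, hd, List.map_cons, PySem.Set.update_cons, hadd, ← hkeys]
      exact ih _ hnd' hsize' hget'

-- a key-dependent findSome? ignores the dedup performed by Set.update
theorem pv_findSome_update (h : String → Option String) :
    ∀ (keys s : List String),
      List.findSome? h (PySem.Set.update s keys) = List.findSome? h (s ++ keys) := by
  intro keys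
  induction keys with
  | nil => intro s; simp [PySem.Set.update_nil]
  | cons k ks ih =>
    intro s
    rw [PySem.Set.update_cons]
    by_cases hm : k ∈ s
    · have hadd : PySem.Set.add s k = s := by
        simp [PySem.Set.add, hm]
      rw [hadd, ih s]
      rw [List.findSome?_append, List.findSome?_append]
      cases hs : List.findSome? h s with
      | some v => simp
      | none =>
        have hk : h k = none := (List.findSome?_eq_none_iff.1 hs) k hm
        simp [List.findSome?, hk]
    · have hadd : PySem.Set.add s k = s ++ [k] := by
        simp [PySem.Set.add, hm]
      rw [hadd, ih (s ++ [k]), List.append_assoc]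
      rfl

-- the two branches agree for any candidate list
theorem pv_main (columns : List String) (preferred : Option String) (cands : List String) :
    pvLoopA (columns.foldl (fun d column => d.insert (pvNorm column) column) PySem.Dict.empty)
        preferred cands
      = pvFirstTruthy preferred (pvFillBest (pvSlots cands) columns) := by
  obtain ⟨hkeys0, hnd0, hsize0, hget0⟩ :=
    pv_slot_inv cands PySem.Dict.empty (by simp) (by simp) (by intro k; simp [pvIdx])
  have hnd : (pvSlots cands).keys.Nodup := hnd0
  have hsize : (pvSlots cands).size = (pvSlots cands).keys.length := hsize0
  have hget : ∀ k, (pvSlots cands).get? k = pvIdx k (pvSlots cands).keys := hget0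
  have hofList : (pvSlots cands).keys = PySem.Set.ofList (cands.map pvNorm) := by
    have : (pvSlots cands).keys = PySem.Set.update PySem.Dict.empty.keys (cands.map pvNorm) := hkeys0
    rw [this, PySem.Dict.keys_empty, PySem.Set.update_nil_left]
  -- B side: the slot table is the per-key last-match list over the deduped keys
  have hB : pvFillBest (pvSlots cands) columns
      = ((pvSlots cands).keys).map
          (fun k => columns.foldl (fun b column => if k = pvNorm column then some column else b) none) := by
    rw [pvFillBest, hsize,
        pv_fold_set (pvSlots cands) (pvSlots cands).keys hnd hget columns _ (by simp),
        pv_zipWith_replicate]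
  -- A side: the dict lookups are the per-key last-match values over all candidate keys
  have hA : pvLoopA (columns.foldl (fun d column => d.insert (pvNorm column) column) PySem.Dict.empty)
        preferred cands
      = pvFirstTruthy preferred
          ((cands.map pvNorm).map
            (fun k => columns.foldl (fun b column => if k = pvNorm column then some column else b) none)) := by
    rw [pv_loopA_firstTruthy, List.map_map]
    congr 1
    refine List.map_congr_left (fun c _ => ?_)
    simp [Function.comp, pv_get_fold, PySem.Dict.get?_empty]
  rw [hA, hB, hofList, pv_firstTruthy_eq, pv_firstTruthy_eq]
  have hupd := pv_findSome_update
    (pvTruthy ∘ fun k => columns.foldl (fun b column => if k = pvNorm column then some column else b) none)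
    (cands.map pvNorm) []
  rw [PySem.Set.update_nil_left] at hupd
  simp only [List.nil_append] at hupd
  simp only [List.findSome?_map]
  rw [hupd, List.findSome?_map]

-- ===== VERDICT (by name: the statement is the Claim_ definition above) =====
theorem resolve_column_name_py_spec : Claim_equal_resolve_column_name_py := by
  intro columns preferred aliases _
  unfold Spec_resolve_column_name_py resolve_column_name_py resolve_column_name_py_alt
  split_ifs with h
  · rfl
  · exact pv_main columns preferred _
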